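-- pv_equiv track=rewrite | github.com/pypi-data/pypi-mirror-311 | packages/py-to-bt-mapping/py_to_bt_mapping-1.0.0-py3-none-any.whl/mapping/operations.py | ith_dollar
-- ===== SOURCE A (Python) =====
-- optionbit = 16
--
-- def ith_dollar(val):
--     val = round(val)
--     val_pos = abs(val)
--     hex_str = '{0:X}'.format(val_pos)
--     if len(hex_str) * 4 > optionbit:
--         return "Value contains the null string"
--     elif val > 0:
--         return hex_str
--     elif val < 0:
--         int_val = int(hex_str, 16)
--         bin_str = bin(int_val)[2:].zfill(optionbit)
--         inverted_bits = ''.join('1' if bit == '0' else '0' for bit in bin_str)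
--         inverted_int = int(inverted_bits, 2)
--         twos_complement_int = inverted_int + 1
--         twos_complement_hex = hex(twos_complement_int)[2:].upper().zfill(optionbit // 4)
--         return twos_complement_hex
--     return "0"
-- ===== SOURCE B (Python) =====
-- def ith_dollar(val):
--     val = round(val)
--     hex_str = format(abs(val), 'X')
--     if len(hex_str) * 4 > 16:
--         return "Value contains the null string"
--     if val > 0:
--         return hex_str
--     if val < 0:
--         return format(val + 0x10000, '04X')
--     return "0"
-- ===== Notes on version B (the rewrite author's own statement) =====
-- stated objective: simpler
-- what changed: The negative branch's hex->binary-string->bit-flip-join->increment->hex round trip is replaced by one addition (val + 0x10000) formatted as '04X'; no intermediate strings are built or reparsed.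
import Mathlib
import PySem

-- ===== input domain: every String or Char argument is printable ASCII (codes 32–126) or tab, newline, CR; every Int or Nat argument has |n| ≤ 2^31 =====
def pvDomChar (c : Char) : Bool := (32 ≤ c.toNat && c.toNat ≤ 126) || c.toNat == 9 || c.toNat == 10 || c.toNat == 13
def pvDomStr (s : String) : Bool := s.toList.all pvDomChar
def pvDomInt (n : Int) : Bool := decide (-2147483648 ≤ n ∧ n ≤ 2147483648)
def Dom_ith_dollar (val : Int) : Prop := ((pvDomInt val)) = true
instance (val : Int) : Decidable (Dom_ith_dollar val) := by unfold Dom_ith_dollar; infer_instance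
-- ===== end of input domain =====

-- B replaces A's hex->binary-string->bit-flip->increment->hex round trip on negatives by the
-- single arithmetic two's-complement formula format(val + 0x10000, '04X'); objective: simpler.

-- Shared hand-ported numeral helpers (exact for the nonnegative ints both Pythons format/parse):
-- uppercase digit character of r (0..15), as in '{0:X}'/bin/hex output
def pvDigitChar (r : Nat) : Char := if r < 10 then Char.ofNat (48 + r) else Char.ofNat (55 + r)
-- value of an uppercase hex/binary digit character, as int(_, base) reads it
def pvDigitVal (c : Char) : Nat := if c.toNat ≤ 57 then c.toNat - 48 else c.toNat - 55
-- digits of n in base b, most significant first ([] for n = 0); exact port of repeated divmod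
def pvGoDigits (b n : Nat) : List Char :=
  if h : 2 ≤ b ∧ 0 < n then pvGoDigits b (n / b) ++ [pvDigitChar (n % b)] else []
  termination_by n
  decreasing_by exact Nat.div_lt_self h.2 (by omega)
-- '{0:X}'.format(n) / format(n,'b')-style digit string of a nonnegative n (exact on that domain)
def pvToDigits (b n : Nat) : List Char := if n = 0 then ['0'] else pvGoDigits b n
-- int(s, b) for a string of digit characters (exact: A only parses its own digit output)
def pvParse (b : Nat) (cs : List Char) : Nat := cs.foldl (fun a c => a * b + pvDigitVal c) 0

-- ===== PORT A =====
def ith_dollar (val : Int) : String :=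
  -- val = round(val): round() of an int is that int
  let valPos : Nat := val.natAbs                        -- abs(val)
  let hexStr : List Char := pvToDigits 16 valPos        -- '{0:X}'.format(val_pos), exact for nonneg
  if hexStr.length * 4 > 16 then "Value contains the null string"
  else if val > 0 then String.mk hexStr
  else if val < 0 then
    let intVal : Nat := pvParse 16 hexStr               -- int(hex_str, 16)
    let binStr : List Char :=
      PySem.Chars.zfill (pvToDigits 2 intVal) 16        -- bin(int_val)[2:].zfill(16), exact for nonneg
    let inverted : List Char := binStr.map (fun bit => if bit = '0' then '1' else '0')
    let invertedInt : Nat := pvParse 2 inverted         -- int(inverted_bits, 2)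
    let tc : Nat := invertedInt + 1
    String.mk (PySem.Chars.zfill (pvToDigits 16 tc) 4)  -- hex(tc)[2:].upper().zfill(4), exact for nonneg
  else "0"

-- ===== PORT B =====
def ith_dollar_alt (val : Int) : String :=
  let hexStr : List Char := pvToDigits 16 val.natAbs    -- format(abs(val), 'X'), exact for nonneg
  if hexStr.length * 4 > 16 then "Value contains the null string"
  else if val > 0 then String.mk hexStr
  else if val < 0 then
    String.mk (PySem.Chars.zfill (pvToDigits 16 (val + 65536).toNat) 4)  -- format(val + 0x10000, '04X')
  else "0"

-- ===== PRECONDITION & SPEC =====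
def Spec_ith_dollar (val : Int) (out : String) : Prop := out = ith_dollar_alt val
instance (val : Int) (out : String) : Decidable (Spec_ith_dollar val out) := by unfold Spec_ith_dollar; infer_instance

-- ===== CLAIM (what is proved, stated in full; the proofs are below) =====
def Claim_equal_ith_dollar : Prop := ∀ (val : Int), Dom_ith_dollar val → Spec_ith_dollar val (ith_dollar val)

-- ===== LEMMAS AND PROOFS =====

lemma pvGoDigits_eq {b n : Nat} (hb : 2 ≤ b) (hn : 0 < n) :
    pvGoDigits b n = pvGoDigits b (n / b) ++ [pvDigitChar (n % b)] := by
  rw [pvGoDigits]; simp [hb, hn]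

lemma pvGoDigits_zero (b : Nat) : pvGoDigits b 0 = [] := by
  rw [pvGoDigits]; simp

lemma pvParse_foldl (b : Nat) (cs : List Char) (a : Nat) :
    List.foldl (fun a c => a * b + pvDigitVal c) a cs = a * b ^ cs.length + pvParse b cs := by
  induction cs generalizing a with
  | nil => simp [pvParse]
  | cons c rest ih =>
      simp only [List.foldl_cons, List.length_cons, pvParse]
      rw [ih, ih (0 * b + pvDigitVal c)]
      ring

lemma pvParse_append_singleton (b : Nat) (cs : List Char) (c : Char) :
    pvParse b (cs ++ [c]) = pvParse b cs * b + pvDigitVal c := by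
  unfold pvParse
  rw [List.foldl_append, pvParse_foldl]
  simp [pvParse]

lemma pvDigit_roundtrip {r : Nat} (hr : r < 16) : pvDigitVal (pvDigitChar r) = r := by
  interval_cases r <;> decide

lemma pvParse_go {b : Nat} (hb : 2 ≤ b) (hb16 : b ≤ 16) :
    ∀ n, pvParse b (pvGoDigits b n) = n := by
  intro n
  induction n using Nat.strong_induction_on with
  | _ n ih =>
    rcases Nat.eq_zero_or_pos n with h0 | hpos
    · subst h0; rw [pvGoDigits_zero]; simp [pvParse]
    · rw [pvGoDigits_eq hb hpos, pvParse_append_singleton,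
        ih (n / b) (Nat.div_lt_self hpos (by omega)),
        pvDigit_roundtrip (lt_of_lt_of_le (Nat.mod_lt n (by omega)) hb16)]
      exact Nat.div_add_mod' n b

lemma pvParse_toDigits {b : Nat} (hb : 2 ≤ b) (hb16 : b ≤ 16) (n : Nat) :
    pvParse b (pvToDigits b n) = n := by
  unfold pvToDigits
  split
  · simp [pvParse, pvDigitVal, *]
  · exact pvParse_go hb hb16 n

lemma pvGoDigits_lt_pow {b : Nat} (hb : 2 ≤ b) :
    ∀ n, n < b ^ (pvGoDigits b n).length := by
  intro n
  induction n using Nat.strong_induction_on with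
  | _ n ih =>
    rcases Nat.eq_zero_or_pos n with h0 | hpos
    · subst h0; rw [pvGoDigits_zero]; simp
    · rw [pvGoDigits_eq hb hpos]
      have h1 := ih (n / b) (Nat.div_lt_self hpos (by omega))
      have h2 : n % b < b := Nat.mod_lt n (by omega)
      have h3 := Nat.div_add_mod n b
      simp only [List.length_append, List.length_singleton, pow_succ]
      nlinarith [Nat.one_le_iff_ne_zero.mpr (pow_ne_zero (pvGoDigits b (n / b)).length (by omega : b ≠ 0))]

lemma pvGoDigits_len_le {b : Nat} (hb : 2 ≤ b) :
    ∀ n k, n < b ^ k → (pvGoDigits b n).length ≤ k := by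
  intro n
  induction n using Nat.strong_induction_on with
  | _ n ih =>
    intro k hk
    rcases Nat.eq_zero_or_pos n with h0 | hpos
    · subst h0; rw [pvGoDigits_zero]; simp
    · rw [pvGoDigits_eq hb hpos]
      have hk0 : k ≠ 0 := by rintro rfl; simp at hk; omega
      have hpow : b ^ k = b ^ (k - 1) * b := by rw [← pow_succ]; congr 1; omega
      have hdiv : n / b < b ^ (k - 1) := Nat.div_lt_of_lt_mul (by rw [mul_comm]; omega)
      have := ih (n / b) (Nat.div_lt_self hpos (by omega)) (k - 1) hdiv
      simp only [List.length_append, List.length_singleton]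
      omega

lemma pvGoDigits_two_binary : ∀ n, ∀ c ∈ pvGoDigits 2 n, c = '0' ∨ c = '1' := by
  intro n
  induction n using Nat.strong_induction_on with
  | _ n ih =>
    intro c hc
    rcases Nat.eq_zero_or_pos n with h0 | hpos
    · subst h0; rw [pvGoDigits_zero] at hc; simp at hc
    · rw [pvGoDigits_eq (by omega) hpos] at hc
      rcases List.mem_append.mp hc with h | h
      · exact ih (n / 2) (Nat.div_lt_self hpos (by omega)) c h
      · have h2 : n % 2 < 2 := Nat.mod_lt n (by omega)
        interval_cases h' : (n % 2) <;> simp_all [pvDigitChar] <;> simp_all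

lemma pvToDigits_two_binary (n : Nat) : ∀ c ∈ pvToDigits 2 n, c = '0' ∨ c = '1' := by
  unfold pvToDigits
  split
  · intro c hc; simp at hc; left; exact hc
  · exact pvGoDigits_two_binary n

lemma pvParse_zeros (b z : Nat) (cs : List Char) :
    pvParse b (List.replicate z '0' ++ cs) = pvParse b cs := by
  induction z with
  | zero => simp
  | succ z ih =>
      unfold pvParse at *
      rw [List.replicate_succ]
      simpa [pvDigitVal] using ih

lemma pvParse_cons (b : Nat) (c : Char) (rest : List Char) :
    pvParse b (c :: rest) = pvDigitVal c * b ^ rest.length + pvParse b rest := by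
  show List.foldl _ _ _ = _
  simp only [List.foldl_cons]
  rw [pvParse_foldl]
  simp

lemma pvParse_binary_lt (bs : List Char) (hb : ∀ c ∈ bs, c = '0' ∨ c = '1') :
    pvParse 2 bs < 2 ^ bs.length := by
  induction bs with
  | nil => simp [pvParse]
  | cons c rest ih =>
      have hc : pvDigitVal c ≤ 1 := by
        rcases hb c (by simp) with h | h <;> subst h <;> decide
      have hr := ih (fun c hc => hb c (by simp [hc]))
      rw [pvParse_cons, List.length_cons, pow_succ]
      nlinarith

lemma pvParse_flip (bs : List Char) (hb : ∀ c ∈ bs, c = '0' ∨ c = '1') :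
    pvParse 2 (bs.map (fun bit => if bit = '0' then '1' else '0')) =
      2 ^ bs.length - 1 - pvParse 2 bs := by
  induction bs with
  | nil => simp [pvParse]
  | cons c rest ih =>
      have hrestb : ∀ c ∈ rest, c = '0' ∨ c = '1' := fun c hc => hb c (by simp [hc])
      have hr := ih hrestb
      have hlt := pvParse_binary_lt rest hrestb
      have hflip : pvDigitVal (if c = '0' then '1' else '0') = 1 - pvDigitVal c ∧ pvDigitVal c ≤ 1 := by
        rcases hb c (by simp) with h | h <;> subst h <;> exact ⟨by decide, by decide⟩
      rw [List.map_cons, pvParse_cons, pvParse_cons, List.length_cons, List.length_map, hr,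
        hflip.1, pow_succ]
      have hp : 1 ≤ 2 ^ rest.length := Nat.one_le_two_pow
      rcases Nat.le_one_iff_eq_zero_or_eq_one.mp hflip.2 with h | h <;> simp [h] <;> omega

lemma pvZfill_digits (d : Char) (rest : List Char) (w : Nat)
    (h1 : d ≠ '+') (h2 : d ≠ '-') :
    PySem.Chars.zfill (d :: rest) (w : Int) =
      List.replicate (w - (d :: rest).length) '0' ++ (d :: rest) := by
  unfold PySem.Chars.zfill
  split
  · rename_i hle
    have : w ≤ (d :: rest).length := by exact_mod_cast hle
    rw [Nat.sub_eq_zero_of_le this]; simp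
  · rename_i hgt
    simp only [h1, h2, false_or, if_neg, or_self]
    have : ((w : Int)).toNat = w := Int.toNat_natCast w
    rw [this]
    split
    · rename_i hsign; exact absurd hsign (by simp [h1, h2])
    · rfl

-- main negative-branch arithmetic: A's string machinery equals 65536 - m
lemma pv_neg_core {m : Nat} (hm1 : 1 ≤ m) (hm2 : m < 65536) :
    pvParse 2 ((PySem.Chars.zfill (pvToDigits 2 (pvParse 16 (pvToDigits 16 m))) 16).map
        (fun bit => if bit = '0' then '1' else '0')) + 1 = 65536 - m := by
  rw [pvParse_toDigits (by omega) (by omega)]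
  -- toDigits 2 m is nonempty with a binary head
  have hbin := pvToDigits_two_binary m
  have hne : pvToDigits 2 m ≠ [] := by
    unfold pvToDigits; split <;> simp [pvGoDigits_eq, hm1, (by omega : (0:Nat) < m), pvGoDigits_eq (by omega : (2:Nat) ≤ 2)]
  obtain ⟨d, rest, hd⟩ := List.exists_cons_of_ne_nil hne
  have hdmem : d ∈ pvToDigits 2 m := by rw [hd]; simp
  have hdne : d ≠ '+' ∧ d ≠ '-' := by rcases hbin d hdmem with h | h <;> subst h <;> exact ⟨by decide, by decide⟩
  have hlen : (pvToDigits 2 m).length ≤ 16 := by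
    unfold pvToDigits
    split
    · simp
    · exact pvGoDigits_len_le (by omega) m 16 (by norm_num; omega)
  have hz : PySem.Chars.zfill (pvToDigits 2 m) 16 =
      List.replicate (16 - (pvToDigits 2 m).length) '0' ++ pvToDigits 2 m := by
    rw [hd]
    exact_mod_cast pvZfill_digits d rest 16 hdne.1 hdne.2
  rw [hz]
  set bs := List.replicate (16 - (pvToDigits 2 m).length) '0' ++ pvToDigits 2 m with hbs
  have hbsbin : ∀ c ∈ bs, c = '0' ∨ c = '1' := by
    intro c hc
    rcases List.mem_append.mp hc with h | h
    · left; exact List.eq_of_mem_replicate h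
    · exact hbin c h
  have hbslen : bs.length = 16 := by
    rw [hbs]; simp; omega
  have hbsval : pvParse 2 bs = m := by
    rw [hbs, pvParse_zeros, pvParse_toDigits (by omega) (by omega)]
  rw [pvParse_flip bs hbsbin, hbsval, hbslen]
  norm_num
  omega

-- ===== VERDICT (by name: the statement is the Claim_ definition above) =====
theorem ith_dollar_spec : Claim_equal_ith_dollar := by
  intro val _
  unfold Spec_ith_dollar ith_dollar ith_dollar_alt
  simp only []
  by_cases hg : (pvToDigits 16 val.natAbs).length * 4 > 16
  · simp [hg]
  · simp only [if_neg hg]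
    by_cases hp : val > 0
    · simp [hp]
    · simp only [if_neg hp]
      by_cases hn : val < 0
      · simp only [if_pos hn]
        have hm1 : 1 ≤ val.natAbs := by omega
        have hm2 : val.natAbs < 65536 := by
          have hle : (pvToDigits 16 val.natAbs).length ≤ 4 := by omega
          have := pvGoDigits_lt_pow (b := 16) (by omega) val.natAbs
          have hlt : val.natAbs < 16 ^ (pvToDigits 16 val.natAbs).length := by
            unfold pvToDigits at hle ⊢
            split at hle <;> split <;> simp_all <;> omega
          calc val.natAbs < 16 ^ (pvToDigits 16 val.natAbs).length := hlt
          _ ≤ 16 ^ 4 := Nat.pow_le_pow_right (by omega) hle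
        have hcore := pv_neg_core hm1 hm2
        have harg : (val + 65536).toNat = 65536 - val.natAbs := by omega
        rw [hcore, harg]
      · simp [hn]
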